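-- pv_equiv track=rewrite | github.com/fantyissues/contest | contest_53748_a.py | satisfied_customers
-- ===== SOURCE A (Python) =====
-- def satisfied_customers(orders: list[int], samples: list[int]) -> int:
--     orders = sorted(orders, reverse=True)
--     samples = sorted(samples, reverse=True)
--     len_orders = len(orders)
--     len_samples = len(samples)
--     order_index = 0
--     sample_index = 0
--     satisfied = 0
--     while order_index < len_orders and sample_index < len_samples:
--         if orders[order_index] > samples[sample_index]:
--             order_index += 1
--             continue
--         satisfied += 1
--         order_index += 1
--         sample_index += 1
--     return satisfied
-- ===== SOURCE B (Python) =====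
-- def satisfied_customers(orders: list[int], samples: list[int]) -> int:
--     # Ascending sweep: walk samples from smallest to largest, pulling in every
--     # order value <= the current sample into a `pending` counter; each sample
--     # serves one pending order if any is available.
--     os = sorted(orders)
--     ss = sorted(samples)
--     n = len(os)
--     i = 0
--     pending = 0
--     result = 0
--     for s in ss:
--         while i < n and os[i] <= s:
--             pending += 1
--             i += 1
--         if pending > 0:
--             result += 1
--             pending -= 1
--     return result
-- ===== Notes on version B (the rewrite author's own statement) =====
-- stated objective: alternative
-- what changed: Replaces A's descending two-pointer greedy (skip orders too large for the current largest sample) with an ascending sweep that feeds orders <= the current sample into a pending counter and lets each sample consume one pending order.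
import Mathlib
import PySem

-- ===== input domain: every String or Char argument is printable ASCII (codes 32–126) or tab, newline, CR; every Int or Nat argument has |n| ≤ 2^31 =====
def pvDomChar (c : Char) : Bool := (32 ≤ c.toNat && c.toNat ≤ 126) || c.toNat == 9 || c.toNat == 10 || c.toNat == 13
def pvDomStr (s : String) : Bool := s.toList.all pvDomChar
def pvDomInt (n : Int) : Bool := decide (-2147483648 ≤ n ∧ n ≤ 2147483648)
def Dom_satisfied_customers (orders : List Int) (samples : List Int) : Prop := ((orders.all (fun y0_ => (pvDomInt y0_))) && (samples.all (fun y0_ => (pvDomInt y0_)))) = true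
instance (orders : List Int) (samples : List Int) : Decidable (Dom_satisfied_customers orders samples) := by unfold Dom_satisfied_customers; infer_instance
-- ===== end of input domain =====

-- B replaces A's descending two-pointer greedy by an ascending pending-counter sweep; objective: alternative (same O(n log n) cost).

-- ===== PORT A =====
-- the while loop of A, on the two descending-sorted lists, with its two indices and counter
def satLoop (O S : List Int) (fuel : Nat) (oi si : Nat) (sat : Int) : Int :=
  match fuel with
  | 0 => sat
  | fuel + 1 =>
    if h : oi < O.length ∧ si < S.length then
      if O[oi] > S[si] then
        satLoop O S fuel (oi + 1) si sat
      else
        satLoop O S fuel (oi + 1) (si + 1) (sat + 1)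
    else sat

def satisfied_customers (orders : List Int) (samples : List Int) : Int :=
  let o := PySem.List.sorted orders (fun x => x) true
  let s := PySem.List.sorted samples (fun x => x) true
  satLoop o s (o.length + s.length) 0 0 0

-- ===== PORT B =====
-- the inner `while i < n and os[i] <= s` loop of B: returns the updated (i, pending)
def bInner (os : List Int) (s : Int) (fuel : Nat) (i pending : Nat) : Nat × Nat :=
  match fuel with
  | 0 => (i, pending)
  | fuel + 1 =>
    if h : i < os.length then
      if os[i] ≤ s then bInner os s fuel (i + 1) (pending + 1)
      else (i, pending)
    else (i, pending)

-- the outer `for s in ss` loop of B, carrying (i, pending, result)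
def bOuter (os : List Int) (ss : List Int) (i pending : Nat) (result : Int) : Int :=
  match ss with
  | [] => result
  | s :: rest =>
    let ip := bInner os s os.length i pending
    if ip.2 > 0 then bOuter os rest ip.1 (ip.2 - 1) (result + 1)
    else bOuter os rest ip.1 ip.2 result

def satisfied_customers_alt (orders : List Int) (samples : List Int) : Int :=
  let os := PySem.List.sorted orders (fun x => x) false
  let ss := PySem.List.sorted samples (fun x => x) false
  bOuter os ss 0 0 0

-- ===== PRECONDITION & SPEC =====
def Spec_satisfied_customers (orders : List Int) (samples : List Int) (out : Int) : Prop := out = satisfied_customers_alt orders samples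
instance (orders : List Int) (samples : List Int) (out : Int) : Decidable (Spec_satisfied_customers orders samples out) := by unfold Spec_satisfied_customers; infer_instance

-- ===== CLAIM (what is proved, stated in full; the proofs are below) =====
def Claim_equal_satisfied_customers : Prop := ∀ (orders : List Int) (samples : List Int), Dom_satisfied_customers orders samples → Spec_satisfied_customers orders samples (satisfied_customers orders samples)

-- ===== LEMMAS AND PROOFS =====

-- A's greedy, as a recursion on the two descending lists
def fA : List Int → List Int → Int
  | [], _ => 0
  | _ :: _, [] => 0
  | o :: O, s :: S => if o > s then fA O (s :: S) else 1 + fA O S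

-- B's greedy, as a recursion on the two ascending lists with a pending counter
def hAsc (p : Nat) : List Int → List Int → Int
  | _, [] => 0
  | [], _ :: S => if p > 0 then 1 + hAsc (p - 1) [] S else hAsc 0 [] S
  | o :: O, s :: S => if o ≤ s then hAsc (p + 1) O (s :: S)
      else if p > 0 then 1 + hAsc (p - 1) (o :: O) S else hAsc 0 (o :: O) S
termination_by O S => O.length + S.length

-- B's greedy with the pending counter eliminated (skip a sample when every remaining order exceeds it)
def f2 : List Int → List Int → Int
  | [], _ => 0
  | _ :: _, [] => 0
  | o :: O, s :: S => if o > s then f2 (o :: O) S else 1 + f2 O S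

theorem fA_nil_right (O : List Int) : fA O [] = 0 := by
  cases O <;> simp [fA]

theorem f2_nil_left (S : List Int) : f2 [] S = 0 := by
  cases S <;> simp [f2]

theorem fA_nil_left (S : List Int) : fA [] S = 0 := by
  cases S <;> simp [fA]

theorem f2_nil_right (O : List Int) : f2 O [] = 0 := by
  cases O <;> simp [f2]

-- L1: the index loop of A computes fA on the dropped suffixes
theorem satLoop_eq_fA (O S : List Int) (fuel oi si : Nat) (sat : Int)
    (hf : (O.length - oi) + (S.length - si) ≤ fuel) :
    satLoop O S fuel oi si sat = sat + fA (O.drop oi) (S.drop si) := by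
  induction fuel generalizing oi si sat with
  | zero =>
    have h1 : O.length ≤ oi := by omega
    rw [satLoop, List.drop_eq_nil_of_le h1, fA_nil_left]; ring
  | succ fuel ih =>
    rw [satLoop]
    split
    · rename_i h
      rw [List.drop_eq_getElem_cons h.1, List.drop_eq_getElem_cons h.2, fA]
      by_cases hgt : O[oi] > S[si]
      · rw [if_pos hgt, if_pos hgt, ih _ _ _ (by omega),
          ← List.drop_eq_getElem_cons h.2]
      · rw [if_neg hgt, if_neg hgt, ih _ _ _ (by omega)]; ring
    · rename_i h
      rcases Nat.lt_or_ge oi O.length with h1 | h1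
      · have h2 : S.length ≤ si := by omega
        rw [List.drop_eq_nil_of_le h2, fA_nil_right]; ring
      · rw [List.drop_eq_nil_of_le h1, fA_nil_left]; ring

-- L2a: the inner while loop advances past the takeWhile prefix
theorem bInner_eq (os : List Int) (s : Int) (fuel i p : Nat)
    (hf : os.length - i ≤ fuel) :
    bInner os s fuel i p =
      (i + ((os.drop i).takeWhile (fun x => decide (x ≤ s))).length,
       p + ((os.drop i).takeWhile (fun x => decide (x ≤ s))).length) := by
  induction fuel generalizing i p with
  | zero =>
    rw [bInner, List.drop_eq_nil_of_le (by omega)]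
    simp
  | succ fuel ih =>
    rw [bInner]
    split
    · rename_i h
      rw [List.drop_eq_getElem_cons h, List.takeWhile_cons]
      by_cases hle : os[i] ≤ s
      · rw [if_pos hle, ih _ _ (by omega)]
        simp [hle]; omega
      · rw [if_neg hle]
        simp [hle]
    · rename_i h
      rw [List.drop_eq_nil_of_le (by omega)]
      simp

-- batching lemma for hAsc: one sample step of hAsc = absorb all leading orders ≤ s, then one close
theorem hAsc_step (p : Nat) (O S : List Int) (s : Int) :
    hAsc p O (s :: S) =
      (if p + (O.takeWhile (fun x => decide (x ≤ s))).length > 0 then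
        1 + hAsc (p + (O.takeWhile (fun x => decide (x ≤ s))).length - 1)
          (O.dropWhile (fun x => decide (x ≤ s))) S
      else hAsc 0 (O.dropWhile (fun x => decide (x ≤ s))) S) := by
  induction O generalizing p with
  | nil => simp [hAsc, List.takeWhile, List.dropWhile]
  | cons o O ih =>
    rw [List.takeWhile_cons, List.dropWhile_cons, hAsc]
    by_cases hle : o ≤ s
    · simp only [hle, decide_true, if_true]
      rw [ih (p + 1), if_pos (by omega)]
      have e1 : p + 1 + (List.takeWhile (fun x => decide (x ≤ s)) O).length - 1
          = p + (List.takeWhile (fun x => decide (x ≤ s)) O).length := by omega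
      rw [e1, List.length_cons, if_pos (by omega)]
      have e2 : p + ((List.takeWhile (fun x => decide (x ≤ s)) O).length + 1) - 1
          = p + (List.takeWhile (fun x => decide (x ≤ s)) O).length := by omega
      rw [e2]
    · simp [hle]

-- L2b: B's outer loop computes hAsc
theorem bOuter_eq_hAsc (os : List Int) (ss : List Int) (i p : Nat) (r : Int) :
    bOuter os ss i p r = r + hAsc p (os.drop i) ss := by
  induction ss generalizing i p r with
  | nil => simp [bOuter, hAsc]
  | cons s rest ih =>
    rw [bOuter, bInner_eq os s os.length i p (by omega), hAsc_step]
    have key : ∀ (l : List Int), l.dropWhile (fun x => decide (x ≤ s))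
        = l.drop (l.takeWhile (fun x => decide (x ≤ s))).length := by
      intro l
      have h2 := List.drop_left (l₁ := l.takeWhile (fun x => decide (x ≤ s)))
        (l₂ := l.dropWhile (fun x => decide (x ≤ s)))
      rw [List.takeWhile_append_dropWhile] at h2
      exact h2.symm
    have hdw : (os.drop i).dropWhile (fun x => decide (x ≤ s))
        = os.drop (i + ((os.drop i).takeWhile (fun x => decide (x ≤ s))).length) := by
      rw [key, List.drop_drop]
    by_cases hp : p + ((os.drop i).takeWhile (fun x => decide (x ≤ s))).length > 0
    · rw [if_pos hp, if_pos hp, ih, hdw]; ring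
    · rw [if_neg hp, if_neg hp, ih, hdw]
      have : p + ((os.drop i).takeWhile (fun x => decide (x ≤ s))).length = 0 := by omega
      rw [this]

-- L3: on an ascending sample list, hAsc's pending counter amounts to f2 after paying off p samples
theorem hAsc_eq_f2 (S : List Int) (hS : S.Pairwise (· ≤ ·)) (p : Nat) (O : List Int) :
    hAsc p O S = (min p S.length : Nat) + f2 O (S.drop p) := by
  revert hS
  fun_induction hAsc p O S with
  | case1 p O => intro _; simp [f2_nil_right]
  | case2 p s S hp ih =>
    intro hS
    rw [ih (List.pairwise_cons.mp hS).2, f2_nil_left, f2_nil_left]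
    simp only [List.length_cons]
    push_cast; omega
  | case3 p s S hp ih =>
    intro hS
    rw [ih (List.pairwise_cons.mp hS).2, f2_nil_left, f2_nil_left]
    simp only [List.length_cons]
    push_cast; omega
  | case4 p o O s S hle ih =>
    intro hS
    rw [ih hS]
    by_cases hp : p < (s :: S).length
    · rw [List.drop_eq_getElem_cons hp, f2]
      have hox : o ≤ (s :: S)[p] := by
        rcases Nat.eq_zero_or_pos p with rfl | hppos
        · simpa using hle
        · refine le_trans hle ?_
          have := List.pairwise_iff_getElem.mp hS 0 p (by omega) hp hppos
          simpa using this
      rw [if_neg (not_lt.mpr hox)]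
      simp only [List.length_cons] at hp ⊢
      push_cast; omega
    · have h1 : (s :: S).drop p = [] := List.drop_eq_nil_of_le (by omega)
      have h2 : (s :: S).drop (p + 1) = [] := List.drop_eq_nil_of_le (by omega)
      rw [h1, h2, f2_nil_right, f2_nil_right]
      simp only [List.length_cons] at hp ⊢
      push_cast; omega
  | case5 p o O s S hle hp ih =>
    intro hS
    obtain ⟨k, rfl⟩ : ∃ k, p = k + 1 := ⟨p - 1, by omega⟩
    simp only [Nat.add_sub_cancel] at ih ⊢
    rw [ih (List.pairwise_cons.mp hS).2, List.drop_succ_cons]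
    simp only [List.length_cons]
    push_cast; omega
  | case6 p o O s S hle hp ih =>
    intro hS
    rw [ih (List.pairwise_cons.mp hS).2]
    have hp0 : p = 0 := by omega
    subst hp0
    have hf : f2 (o :: O) (s :: S) = f2 (o :: O) S := by
      rw [f2, if_pos (not_le.mp hle)]
    simp only [List.drop_zero, hf, Nat.zero_min]

-- appending a sample smaller than every order changes nothing
theorem fA_append_small (Od : List Int) (s : Int) (hs : ∀ o ∈ Od, s < o) (Sd : List Int) :
    fA Od (Sd ++ [s]) = fA Od Sd := by
  induction Od generalizing Sd with
  | nil => simp [fA]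
  | cons o1 Od ih =>
    have ho1 : s < o1 := hs o1 (by simp)
    have htl : ∀ o ∈ Od, s < o := fun o hm => hs o (by simp [hm])
    cases Sd with
    | nil =>
      have h0 := ih htl []
      simp only [List.nil_append] at h0
      simp only [List.nil_append, fA, if_pos ho1, h0, fA_nil_right]
    | cons s1 Sd =>
      simp only [List.cons_append, fA]
      by_cases h1 : o1 > s1
      · rw [if_pos h1, if_pos h1, ← List.cons_append, ih htl (s1 :: Sd)]
      · rw [if_neg h1, if_neg h1, ih htl Sd]

-- appending a smallest order and a sample it fits yields one extra match
theorem fA_append_match (Od : List Int) (o s : Int) (hos : o ≤ s) (Sd : List Int)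
    (hSd : ∀ x ∈ Sd, o ≤ x) :
    fA (Od ++ [o]) (Sd ++ [s]) = 1 + fA Od Sd := by
  induction Od generalizing Sd with
  | nil =>
    cases Sd with
    | nil => simp [fA, not_lt.mpr hos]
    | cons s1 Sd =>
      have h1 : ¬ o > s1 := not_lt.mpr (hSd s1 (by simp))
      simp [fA, h1]
  | cons o1 Od ih =>
    cases Sd with
    | nil =>
      have h0 := ih [] (by simp)
      simp only [List.nil_append] at h0
      by_cases h1 : o1 > s
      · simp only [List.nil_append, List.cons_append, fA, if_pos h1, h0, fA_nil_right]
      · simp only [List.nil_append, List.cons_append, fA, if_neg h1, fA_nil_right]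
    | cons s1 Sd =>
      simp only [List.cons_append, fA]
      by_cases h1 : o1 > s1
      · rw [if_pos h1, if_pos h1, ← List.cons_append, ih (s1 :: Sd) hSd]
      · rw [if_neg h1, if_neg h1, ih Sd (fun x hx => hSd x (by simp [hx]))]

-- L4: the ascending greedy equals the descending greedy on the reversed lists
theorem f2_eq_fA_reverse (S : List Int) (O : List Int)
    (hO : O.Pairwise (· ≤ ·)) (hS : S.Pairwise (· ≤ ·)) :
    f2 O S = fA O.reverse S.reverse := by
  induction S generalizing O with
  | nil => rw [f2.eq_def]; cases O <;> simp [fA_nil_right]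
  | cons s S ih =>
    cases O with
    | nil => simp [fA_nil_left, f2_nil_left]
    | cons o O =>
      have hOtl := (List.pairwise_cons.mp hO).2
      have hStl := (List.pairwise_cons.mp hS).2
      rw [f2]
      by_cases h1 : o > s
      · rw [if_pos h1, ih _ hO hStl, List.reverse_cons, List.reverse_cons]
        rw [fA_append_small]
        intro x hx
        simp only [List.mem_append, List.mem_reverse, List.mem_singleton] at hx
        rcases hx with hx | rfl
        · exact lt_of_lt_of_le h1 (List.rel_of_pairwise_cons hO hx)
        · exact h1
      · rw [if_neg h1, ih _ hOtl hStl, List.reverse_cons, List.reverse_cons]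
        rw [fA_append_match _ _ _ (not_lt.mp h1)]
        intro x hx
        rw [List.mem_reverse] at hx
        exact le_trans (not_lt.mp h1) (List.rel_of_pairwise_cons hS hx)

-- L5: Python's sorted(xs, reverse=True) on ints is the reverse of sorted(xs)
theorem sorted_rev_eq_reverse (xs : List Int) :
    PySem.List.sorted xs (fun x => x) true = (PySem.List.sorted xs (fun x => x) false).reverse := by
  have h : (PySem.List.sorted xs (fun x => x) true).reverse
      = PySem.List.sorted xs (fun x => x) false := by
    apply PySem.List.eq_of_perm_of_pairwise_le_of_injective (fun x : Int => x)
      (fun a b hab => hab)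
    · exact ((PySem.List.sorted xs (fun x => x) true).reverse_perm.trans
        (PySem.List.sorted_perm xs (fun x => x) true)).trans
        (PySem.List.sorted_perm xs (fun x => x) false).symm
    · exact List.pairwise_reverse.mpr (PySem.List.sorted_pairwise_rev xs (fun x => x))
    · exact PySem.List.sorted_pairwise xs (fun x => x)
  rw [← h, List.reverse_reverse]

-- ===== VERDICT (by name: the statement is the Claim_ definition above) =====
theorem satisfied_customers_spec : Claim_equal_satisfied_customers := by
  intro orders samples _
  unfold Spec_satisfied_customers satisfied_customers satisfied_customers_alt
  have hO := PySem.List.sorted_pairwise (xs := orders) (key := fun x => x)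
  have hS := PySem.List.sorted_pairwise (xs := samples) (key := fun x => x)
  rw [satLoop_eq_fA _ _ _ _ _ _ (by omega), bOuter_eq_hAsc, hAsc_eq_f2 _ hS]
  simp only [List.drop_zero]
  rw [f2_eq_fA_reverse _ _ hO hS,
    sorted_rev_eq_reverse orders, sorted_rev_eq_reverse samples]
  simp
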